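-- pv_equiv track=rewrite | github.com/seyed0123/classic_AI | AI-Project/AI-Project/agent_utils.py | get_possible_selections
-- ===== SOURCE A (Python) =====
-- from typing import List, Optional, Tuple
--
-- EMPTY_CELL = None
--
-- def get_possible_selections(board: List[List[Optional[str]]], player_symbol: str) -> List[Tuple[int, int]]:
--     """
--     Finds all valid source cells a player can select from the rim.
--
--     Args:
--         board: The current game board state.
--         player_symbol: The symbol of the player ('X' or 'O').
--
--     Returns:
--         A list of (row, col) tuples representing valid cells to select.
--     """
--     size = len(board)
--     rim_cells_coords = []
--     for r_idx in range(size):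
--         for c_idx in range(size):
--             if r_idx == 0 or r_idx == size - 1 or c_idx == 0 or c_idx == size - 1:
--                 rim_cells_coords.append((r_idx, c_idx))
--
--     empty_rim_selections = []
--     player_rim_selections = []
--
--     for r, c in rim_cells_coords:
--         if board[r][c] == EMPTY_CELL:
--             empty_rim_selections.append((r, c))
--         elif board[r][c] == player_symbol:
--             player_rim_selections.append((r, c))
--
--     # The rule is: if empty cells exist on the rim, player MUST select one of them.
--     # Otherwise, they must select one of their own pieces on the rim.
--     if empty_rim_selections:
--         return empty_rim_selections
--     else:
--         return player_rim_selections
-- ===== SOURCE B (Python) =====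
-- from typing import List, Optional, Tuple
--
--
-- def get_possible_selections(board: List[List[Optional[str]]], player_symbol: str) -> List[Tuple[int, int]]:
--     """Rim-only enumeration: list the rim coordinates directly (top row, side
--     columns, bottom row) instead of testing every cell of the board."""
--     size = len(board)
--     if size == 0:
--         return []
--     if size == 1:
--         rim = [(0, 0)]
--     else:
--         rim = [(0, c) for c in range(size)]
--         for r in range(1, size - 1):
--             rim += [(r, 0), (r, size - 1)]
--         rim += [(size - 1, c) for c in range(size)]
--     empties = [(r, c) for r, c in rim if board[r][c] is None]
--     if empties:
--         return empties
--     return [(r, c) for r, c in rim if board[r][c] == player_symbol]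
-- ===== Notes on version B (the rewrite author's own statement) =====
-- stated objective: alternative
-- what changed: B enumerates the rim coordinates directly (top row, side columns, bottom row) instead of scanning all n^2 cells testing each for rim membership, and classifies them with two filters instead of one two-accumulator pass.
import Mathlib
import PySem

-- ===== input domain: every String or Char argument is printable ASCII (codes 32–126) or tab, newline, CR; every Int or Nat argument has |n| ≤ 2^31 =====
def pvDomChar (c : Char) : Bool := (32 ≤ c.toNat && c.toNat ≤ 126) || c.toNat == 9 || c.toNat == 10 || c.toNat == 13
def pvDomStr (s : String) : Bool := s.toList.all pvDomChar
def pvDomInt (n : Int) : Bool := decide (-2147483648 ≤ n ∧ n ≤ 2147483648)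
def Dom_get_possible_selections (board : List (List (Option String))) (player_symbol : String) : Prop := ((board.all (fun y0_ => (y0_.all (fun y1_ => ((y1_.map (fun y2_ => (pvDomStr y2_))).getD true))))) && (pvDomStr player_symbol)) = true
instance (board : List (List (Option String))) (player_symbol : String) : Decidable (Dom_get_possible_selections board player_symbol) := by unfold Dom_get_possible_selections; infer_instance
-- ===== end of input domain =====

-- B replaces A's scan of every cell (testing each for rim membership) by a direct enumeration
-- of the rim coordinates (top row, side columns, bottom row) in the same row-major order,
-- classifying cells by two filters instead of one two-accumulator pass (alternative algorithm).

-- board[r][c], totalized (Pre_ excludes the out-of-range accesses, where Python raises)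
def pvCell (board : List (List (Option String))) (r c : Int) : Option String :=
  (PySem.List.pyGet? ((PySem.List.pyGet? board r).getD []) c).getD none

-- ===== PORT A =====
def get_possible_selections (board : List (List (Option String))) (player_symbol : String) : List (Int × Int) :=
  let size : Int := board.length
  let rim_cells_coords : List (Int × Int) :=
    (PySem.List.pyRange 0 size 1).foldl (fun acc r_idx =>
      (PySem.List.pyRange 0 size 1).foldl (fun acc2 c_idx =>
        if (r_idx == 0 || r_idx == size - 1 || c_idx == 0 || c_idx == size - 1) then
          acc2 ++ [(r_idx, c_idx)]
        else acc2) acc) []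
  let pair : List (Int × Int) × List (Int × Int) :=
    rim_cells_coords.foldl (fun p rc =>
      if pvCell board rc.1 rc.2 = none then (p.1 ++ [rc], p.2)
      else if pvCell board rc.1 rc.2 = some player_symbol then (p.1, p.2 ++ [rc])
      else p) ([], [])
  if pair.1.isEmpty then pair.2 else pair.1

-- ===== PORT B =====
def get_possible_selections_alt (board : List (List (Option String))) (player_symbol : String) : List (Int × Int) :=
  let size : Int := board.length
  if size = 0 then []
  else
    let rim : List (Int × Int) :=
      if size = 1 then [(0, 0)]
      else
        ((PySem.List.pyRange 0 size 1).map (fun c => ((0 : Int), c)))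
          ++ ((PySem.List.pyRange 1 (size - 1) 1).foldl
                (fun acc r => acc ++ [(r, 0), (r, size - 1)]) [])
          ++ ((PySem.List.pyRange 0 size 1).map (fun c => (size - 1, c)))
    let empties := rim.filter (fun rc => pvCell board rc.1 rc.2 = none)
    if empties.isEmpty then
      rim.filter (fun rc => pvCell board rc.1 rc.2 = some player_symbol)
    else empties

-- ===== PRECONDITION & SPEC =====
-- Pre_ excludes exactly the inputs where A raises IndexError: some row of the board is
-- shorter than the board's number of rows, so a rim access board[r][c] goes out of range.
def Pre_get_possible_selections (board : List (List (Option String))) (player_symbol : String) : Prop :=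
  ∀ row ∈ board, board.length ≤ row.length
instance (board : List (List (Option String))) (player_symbol : String) : Decidable (Pre_get_possible_selections board player_symbol) := by unfold Pre_get_possible_selections; infer_instance

def pvWitness_get_possible_selections : List (List (Option String)) × String :=
  ([[some "X", none], [some "O", some "X"]], "X")

def Spec_get_possible_selections (board : List (List (Option String))) (player_symbol : String) (out : List (Int × Int)) : Prop := out = get_possible_selections_alt board player_symbol
instance (board : List (List (Option String))) (player_symbol : String) (out : List (Int × Int)) : Decidable (Spec_get_possible_selections board player_symbol out) := by unfold Spec_get_possible_selections; infer_instance

-- ===== CLAIM (what is proved, stated in full; the proofs are below) =====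
def Claim_equal_get_possible_selections : Prop := ∀ (board : List (List (Option String))) (player_symbol : String), Dom_get_possible_selections board player_symbol → Pre_get_possible_selections board player_symbol → Spec_get_possible_selections board player_symbol (get_possible_selections board player_symbol)

-- ===== LEMMAS AND PROOFS =====

-- A's two-accumulator classification pass, characterised as two filters.
theorem pv_classify_eq (board : List (List (Option String))) (player_symbol : String) :
    ∀ (l : List (Int × Int)) (e m : List (Int × Int)),
      l.foldl (fun p rc =>
        if pvCell board rc.1 rc.2 = none then (p.1 ++ [rc], p.2)
        else if pvCell board rc.1 rc.2 = some player_symbol then (p.1, p.2 ++ [rc])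
        else p) (e, m)
      = (e ++ l.filter (fun rc => pvCell board rc.1 rc.2 = none),
         m ++ l.filter (fun rc => pvCell board rc.1 rc.2 = some player_symbol)) := by
  intro l
  induction l with
  | nil => simp
  | cons rc t ih =>
    intro e m
    by_cases hE : pvCell board rc.1 rc.2 = none
    · simp [hE, ih]
    · by_cases hM : pvCell board rc.1 rc.2 = some player_symbol
      · simp [hM, ih]
      · simp [hE, hM, ih]

-- the middle rows keep only the two side columns
theorem pv_filter_sides (size : Int) (h2 : 2 ≤ size) (r : Int) (hr0 : r ≠ 0) (hr1 : r ≠ size - 1) :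
    (PySem.List.pyRange 0 size 1).filter
        (fun c => (r == 0 || r == size - 1 || c == 0 || c == size - 1)) = [0, size - 1] := by
  rw [PySem.List.pyRange_one_append 0 1 size (by omega) (by omega),
      PySem.List.pyRange_one_append 1 (size - 1) size (by omega) (by omega)]
  have h1 : PySem.List.pyRange 0 1 1 = [(0 : Int)] := PySem.List.pyRange_one_singleton 0
  have h3 : PySem.List.pyRange (size - 1) size 1 = [size - 1] := by
    have := PySem.List.pyRange_one_singleton (size - 1)
    simpa [sub_add_cancel] using this
  rw [h1, h3, List.filter_append, List.filter_append]
  have hmid : (PySem.List.pyRange 1 (size - 1) 1).filter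
      (fun c => (r == 0 || r == size - 1 || c == 0 || c == size - 1)) = [] := by
    apply List.filter_eq_nil_iff.mpr
    intro c hc
    rw [PySem.List.mem_pyRange_one] at hc
    simp only [Bool.or_eq_true, beq_iff_eq]
    omega
  rw [hmid]
  simp

-- a flatMap over range(size) split into first row, middle rows, last row
theorem pv_flatMap_split {b : Type} (size : Int) (h2 : 2 <= size) (g : Int -> List b) :
    (PySem.List.pyRange 0 size 1).flatMap g
      = g 0 ++ (PySem.List.pyRange 1 (size - 1) 1).flatMap g ++ g (size - 1) := by
  rw [PySem.List.pyRange_one_append 0 1 size (by omega) (by omega),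
      PySem.List.pyRange_one_append 1 (size - 1) size (by omega) (by omega)]
  have ha : PySem.List.pyRange (0 : Int) 1 1 = [(0 : Int)] := PySem.List.pyRange_one_singleton 0
  have hb : PySem.List.pyRange (size - 1) size 1 = [size - 1] := by
    have := PySem.List.pyRange_one_singleton (size - 1)
    simpa [sub_add_cancel] using this
  rw [ha, hb]
  simp [List.flatMap_append]

-- A's full-board scan builds exactly B's direct rim enumeration
theorem pv_rim_eq (size : Int) (h : 1 ≤ size) :
    (PySem.List.pyRange 0 size 1).foldl (fun acc r_idx =>
      (PySem.List.pyRange 0 size 1).foldl (fun acc2 c_idx =>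
        if (r_idx == 0 || r_idx == size - 1 || c_idx == 0 || c_idx == size - 1) then
          acc2 ++ [(r_idx, c_idx)]
        else acc2) acc) []
    = (if size = 1 then [((0 : Int), (0 : Int))]
       else ((PySem.List.pyRange 0 size 1).map (fun c => ((0 : Int), c)))
          ++ ((PySem.List.pyRange 1 (size - 1) 1).foldl
                (fun acc r => acc ++ [(r, 0), (r, size - 1)]) [])
          ++ ((PySem.List.pyRange 0 size 1).map (fun c => (size - 1, c)))) := by
  -- rewrite the nested loops into a flatMap of filtered rows
  have hrow : ∀ (r : Int) (acc : List (Int × Int)),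
      (PySem.List.pyRange 0 size 1).foldl (fun acc2 c_idx =>
        if (r == 0 || r == size - 1 || c_idx == 0 || c_idx == size - 1) then
          acc2 ++ [(r, c_idx)]
        else acc2) acc
      = acc ++ ((PySem.List.pyRange 0 size 1).filter
            (fun c => (r == 0 || r == size - 1 || c == 0 || c == size - 1))).map
            (fun c => (r, c)) := by
    intro r acc
    exact PySem.List.foldl_append_if
      (fun c => (r == 0 || r == size - 1 || c == 0 || c == size - 1))
      (fun c => (r, c)) (PySem.List.pyRange 0 size 1) acc
  have houter :
      (PySem.List.pyRange 0 size 1).foldl (fun acc r_idx =>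
        (PySem.List.pyRange 0 size 1).foldl (fun acc2 c_idx =>
          if (r_idx == 0 || r_idx == size - 1 || c_idx == 0 || c_idx == size - 1) then
            acc2 ++ [(r_idx, c_idx)]
          else acc2) acc) []
      = (PySem.List.pyRange 0 size 1).flatMap (fun r =>
          ((PySem.List.pyRange 0 size 1).filter
            (fun c => (r == 0 || r == size - 1 || c == 0 || c == size - 1))).map
            (fun c => (r, c))) := by
    have hfun : (fun (acc : List (Int × Int)) r_idx =>
        (PySem.List.pyRange 0 size 1).foldl (fun acc2 c_idx =>
          if (r_idx == 0 || r_idx == size - 1 || c_idx == 0 || c_idx == size - 1) then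
            acc2 ++ [(r_idx, c_idx)]
          else acc2) acc)
        = fun acc r => acc ++ ((PySem.List.pyRange 0 size 1).filter
            (fun c => (r == 0 || r == size - 1 || c == 0 || c == size - 1))).map
            (fun c => (r, c)) :=
      funext fun acc => funext fun r => hrow r acc
    rw [hfun]
    simpa using PySem.List.foldl_append_eq_flatMap (fun r =>
      ((PySem.List.pyRange 0 size 1).filter
        (fun c => (r == 0 || r == size - 1 || c == 0 || c == size - 1))).map
        (fun c => (r, c))) (PySem.List.pyRange 0 size 1) []
  rw [houter]
  by_cases h1 : size = 1
  · subst h1; decide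
  · have h2 : 2 ≤ size := by omega
    simp only [if_neg h1]
    rw [pv_flatMap_split size h2]
    have htop : List.filter
        (fun c => (0 : Int) == 0 || (0 : Int) == size - 1 || c == 0 || c == size - 1)
        (PySem.List.pyRange 0 size 1) = PySem.List.pyRange 0 size 1 :=
      List.filter_eq_self.mpr (fun c _ => by simp)
    have hbot : List.filter
        (fun c => size - 1 == 0 || size - 1 == size - 1 || c == 0 || c == size - 1)
        (PySem.List.pyRange 0 size 1) = PySem.List.pyRange 0 size 1 :=
      List.filter_eq_self.mpr (fun c _ => by simp)
    have hmid : (PySem.List.pyRange 1 (size - 1) 1).flatMap (fun r =>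
          (List.filter (fun c => r == 0 || r == size - 1 || c == 0 || c == size - 1)
            (PySem.List.pyRange 0 size 1)).map (fun c => (r, c)))
        = (PySem.List.pyRange 1 (size - 1) 1).flatMap (fun r => [(r, (0 : Int)), (r, size - 1)]) :=
      List.flatMap_congr (fun r hr => by
        rw [PySem.List.mem_pyRange_one] at hr
        rw [pv_filter_sides size h2 r (by omega) (by omega)]
        simp)
    rw [htop, hbot, hmid,
        PySem.List.foldl_append_eq_flatMap (fun r => [(r, (0 : Int)), (r, size - 1)])]
    simp

-- ===== VERDICT (by name: the statement is the Claim_ definition above) =====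
theorem get_possible_selections_spec : Claim_equal_get_possible_selections := by
  intro board player_symbol _ _
  unfold Spec_get_possible_selections get_possible_selections get_possible_selections_alt
  by_cases h0 : (board.length : Int) = 0
  · simp [h0, PySem.List.pyRange_one_eq_nil (by omega : (0:Int) >= 0)]
  · have h1 : (1 : Int) <= (board.length : Int) := by
      have : 0 <= (board.length : Int) := Int.natCast_nonneg _
      omega
    simp only [if_neg h0]
    rw [pv_rim_eq (board.length : Int) h1]
    rw [pv_classify_eq board player_symbol]
    simp only [List.nil_append]
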